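-- pv_equiv track=rewrite | github.com/jebt/teletekst-nieuws | teletekst_nieuws_lib.py | transform_to_normal_format
-- ===== SOURCE A (Python) =====
-- def transform_to_normal_format(tt_format_text: str) -> str:
--     def is_closing_quote(char, index, text):
--         assert char == text[index] and char in ["'", '"']
--         text_so_far = text[:index]
--         if text_so_far.count(char) % 2 == 1:
--             return True
--         return False
--
--     lines = tt_format_text.split("\n")
--     for i, line in enumerate(lines):
--         if line.strip() == "":
--             lines[i] = "\n\n"
--         else:
--             lines[i] = line.strip() + " "
--     compact_text = "".join(lines)
--     new_text = compact_text
--     correction_counter = 0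
--     for i, character in enumerate(compact_text):
--         numbers = "0123456789"
--         if i == 0:
--             continue
--         # ignore . in "..."
--         if character == "." and compact_text[i + 1] == ".":
--             continue
--         # ignore . in big numbers
--         if character == "." and (compact_text[i - 1] in numbers and
--                                  compact_text[i + 1] in numbers and  # these do not go out of bounds because there is
--                                  compact_text[i + 2] in numbers and  # an added space at the end and the rest does not
--                                  compact_text[i + 3] in numbers):    # get evaluated
--             continue
--         # ignore . in .nl, .com, .net, .org, .eu, .be
--         if character == "." and (
--                 (compact_text[i + 1] == 'n' and
--                  compact_text[i + 2] == 'l') or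
--                 (compact_text[i + 1] == 'c' and
--                  compact_text[i + 2] == 'o' and
--                  compact_text[i + 3] == 'm') or
--                 (compact_text[i + 1] == 'n' and
--                  compact_text[i + 2] == 'e' and
--                  compact_text[i + 3] == 't') or
--                 (compact_text[i + 1] == 'o' and
--                  compact_text[i + 2] == 'r' and
--                  compact_text[i + 3] == 'g') or
--                 (compact_text[i + 1] == 'e' and
--                  compact_text[i + 2] == 'u') or
--                 (compact_text[i + 1] == 'b' and
--                  compact_text[i + 2] == 'e')):
--             continue
--
--         # ignore , in decimal numbers
--         elif character == "," and (compact_text[i - 1] in numbers and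
--                                    compact_text[i + 1] in numbers):
--             continue
--
--         # ignore . and ! and ? when followed by closing ' or "
--         elif character in ".!?" and (compact_text[i + 1] in "'\"" and
--                                      is_closing_quote(compact_text[i + 1], i + 1, compact_text)):
--             continue
--
--         # put in a space after .,!?;: if followed by something other than whitespace
--         elif character in ".,!?;:" and compact_text[i + 1].strip() != "":
--             correction_counter += 1
--             new_text = new_text[:i + correction_counter] + " " + compact_text[i + 1:]
--
--     # remove the spaces at the end of the lines
--     new_lines = new_text.splitlines()
--     for i, line in enumerate(new_lines):
--         if len(line) > 0 and line[-1] == " ":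
--             new_lines[i] = line.strip()
--     new_text = "\n".join(new_lines)
--     new_text = new_text.strip()
--     return new_text
-- ===== SOURCE B (Python) =====
-- def transform_to_normal_format(tt_format_text: str) -> str:
--     parts = []
--     for line in tt_format_text.split("\n"):
--         s = line.strip()
--         parts.append("\n\n" if s == "" else s + " ")
--     compact = "".join(parts)
--     numbers = "0123456789"
--
--     def should_space(c, i, sq, dq):
--         # decide using the running quote counts sq/dq over compact[:i+1]
--         if c not in ".,!?;:" or compact[i + 1].strip() == "":
--             return False
--         nxt = compact[i + 1]
--         if c == "." and (
--             nxt == "."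
--             or (compact[i - 1] in numbers and nxt in numbers
--                 and compact[i + 2] in numbers and compact[i + 3] in numbers)
--             or compact[i + 1:i + 3] in ("nl", "eu", "be")
--             or compact[i + 1:i + 4] in ("com", "net", "org")
--         ):
--             return False
--         if c == "," and compact[i - 1] in numbers and nxt in numbers:
--             return False
--         if c in ".!?" and nxt in "'\"" and (sq if nxt == "'" else dq) % 2 == 1:
--             return False
--         return True
--
--     out = []
--     sq = dq = 0
--     for i, c in enumerate(compact):
--         out.append(c)
--         if c == "'":
--             sq += 1
--         elif c == '"':
--             dq += 1
--         if i != 0 and should_space(c, i, sq, dq):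
--             out.append(" ")
--     new_text = "".join(out)
--     fixed = [line.strip() if line.endswith(" ") else line
--              for line in new_text.splitlines()]
--     return "\n".join(fixed).strip()
-- ===== Notes on version B (the rewrite author's own statement) =====
-- stated objective: alternative
-- what changed: A rebuilds the whole string by slicing/concatenation at every correction and re-counts the quote characters over the whole prefix at every closing-quote test; B makes a single pass that appends into a list (joined once) while maintaining running quote counters, deciding each position in O(1).
import Mathlib
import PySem

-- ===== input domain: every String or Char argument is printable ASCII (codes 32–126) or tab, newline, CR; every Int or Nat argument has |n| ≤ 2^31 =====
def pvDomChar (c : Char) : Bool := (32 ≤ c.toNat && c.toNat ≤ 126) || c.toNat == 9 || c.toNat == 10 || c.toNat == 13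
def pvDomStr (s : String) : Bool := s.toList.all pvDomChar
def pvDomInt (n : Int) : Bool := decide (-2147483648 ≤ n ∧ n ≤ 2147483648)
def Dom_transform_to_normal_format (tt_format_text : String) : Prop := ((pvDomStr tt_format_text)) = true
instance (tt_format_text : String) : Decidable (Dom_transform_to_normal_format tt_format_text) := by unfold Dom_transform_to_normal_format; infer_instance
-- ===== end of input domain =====

-- B replaces A's per-correction string slicing and per-quote prefix recount by one pass with
-- running quote counters, appending into a list joined once (objective: alternative algorithm).

-- ===== PORT A =====

-- shared constant: the string "0123456789" both Pythons bind to `numbers`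
def pvNums : List Char := "0123456789".toList

-- Python's t[i] for a Nat index; every reachable access is in range (the compacted text always
-- ends with ' ' or '\n' and the checks short-circuit before the padding), so the default is never read.
def pvGetD (t : List Char) (i : Nat) : Char := (PySem.List.pyGet? t (i : Int)).getD ' '

-- is_closing_quote(char, index, text): text[:index].count(char) % 2 == 1
def pvA_isClosingQuote (ch : Char) (index : Nat) (text : List Char) : Bool :=
  PySem.Chars.count (PySem.List.slice text none (some (index : Int))) [ch] % 2 == 1

-- the body of one iteration of A's `for i, character in enumerate(compact_text)` loop,
-- acting on the state (new_text, correction_counter)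
def pvA_step (t : List Char) (i : Nat) (newText : List Char) (cc : Nat) : List Char × Nat :=
  let character := pvGetD t i
  if i == 0 then (newText, cc)
  else if character == '.' && pvGetD t (i+1) == '.' then (newText, cc)
  else if character == '.' && (pvNums.contains (pvGetD t (i-1)) && pvNums.contains (pvGetD t (i+1))
          && pvNums.contains (pvGetD t (i+2)) && pvNums.contains (pvGetD t (i+3))) then (newText, cc)
  else if character == '.' &&
          ((pvGetD t (i+1) == 'n' && pvGetD t (i+2) == 'l')
           || (pvGetD t (i+1) == 'c' && pvGetD t (i+2) == 'o' && pvGetD t (i+3) == 'm')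
           || (pvGetD t (i+1) == 'n' && pvGetD t (i+2) == 'e' && pvGetD t (i+3) == 't')
           || (pvGetD t (i+1) == 'o' && pvGetD t (i+2) == 'r' && pvGetD t (i+3) == 'g')
           || (pvGetD t (i+1) == 'e' && pvGetD t (i+2) == 'u')
           || (pvGetD t (i+1) == 'b' && pvGetD t (i+2) == 'e')) then (newText, cc)
  else if character == ',' && (pvNums.contains (pvGetD t (i-1)) && pvNums.contains (pvGetD t (i+1))) then (newText, cc)
  else if ".!?".toList.contains character && ("'\"".toList.contains (pvGetD t (i+1))
          && pvA_isClosingQuote (pvGetD t (i+1)) (i+1) t) then (newText, cc)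
  else if ".,!?;:".toList.contains character && (PySem.Chars.strip [pvGetD t (i+1)] != []) then
    let cc' := cc + 1
    (PySem.List.slice newText none (some ((i + cc' : Nat) : Int)) ++ [' ']
       ++ PySem.List.slice t (some ((i + 1 : Nat) : Int)) none, cc')
  else (newText, cc)

def pvA_loop (t : List Char) (i : Nat) (newText : List Char) (cc : Nat) : List Char × Nat :=
  if _h : i < t.length then
    let st := pvA_step t i newText cc
    pvA_loop t (i+1) st.1 st.2
  else (newText, cc)
termination_by t.length - i

def transform_to_normal_format (tt_format_text : String) : String :=
  let lines := PySem.Chars.splitOn tt_format_text.toList ['\n']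
  let lines := lines.map (fun line =>
    if PySem.Chars.strip line == [] then "\n\n".toList else PySem.Chars.strip line ++ [' '])
  let compact := PySem.Chars.join [] lines
  let res := pvA_loop compact 0 compact 0
  let newLines := PySem.Chars.splitlines res.1
  -- `len(line) > 0 and line[-1] == " "`: the guard and line[-1] ported together via pyGet? (none exactly when the guard fails)
  let newLines := newLines.map (fun line =>
    if PySem.List.pyGet? line (-1) == some ' ' then PySem.Chars.strip line else line)
  String.ofList (PySem.Chars.strip (PySem.Chars.join ['\n'] newLines))

-- ===== PORT B =====

-- should_space(c, i, sq, dq): decision per position using the running quote counts sq/dq over compact[:i+1]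
def pvB_shouldSpace (t : List Char) (i : Nat) (sq dq : Nat) : Bool :=
  let c := pvGetD t i
  let nxt := pvGetD t (i+1)
  if !(".,!?;:".toList.contains c) || PySem.Chars.strip [nxt] == [] then false
  else if c == '.' &&
      (nxt == '.'
       || (pvNums.contains (pvGetD t (i-1)) && pvNums.contains nxt
           && pvNums.contains (pvGetD t (i+2)) && pvNums.contains (pvGetD t (i+3)))
       || ["nl".toList, "eu".toList, "be".toList].contains
            (PySem.List.slice t (some ((i + 1 : Nat) : Int)) (some ((i + 3 : Nat) : Int)))
       || ["com".toList, "net".toList, "org".toList].contains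
            (PySem.List.slice t (some ((i + 1 : Nat) : Int)) (some ((i + 4 : Nat) : Int)))) then false
  else if c == ',' && (pvNums.contains (pvGetD t (i-1)) && pvNums.contains nxt) then false
  else if ".!?".toList.contains c && "'\"".toList.contains nxt
          && (if nxt == '\'' then sq else dq) % 2 == 1 then false
  else true

-- one iteration of B's single pass: append the character (and possibly one space), bump the counters
def pvB_step (t : List Char) (i : Nat) (acc : List Char) (sq dq : Nat) : List Char × Nat × Nat :=
  let c := pvGetD t i
  let sq' := if c == '\'' then sq + 1 else sq
  let dq' := if c == '"' then dq + 1 else dq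
  let acc' := if i != 0 && pvB_shouldSpace t i sq' dq' then acc ++ [c, ' '] else acc ++ [c]
  (acc', sq', dq')

def pvB_loop (t : List Char) (i : Nat) (acc : List Char) (sq dq : Nat) : List Char :=
  if _h : i < t.length then
    let st := pvB_step t i acc sq dq
    pvB_loop t (i+1) st.1 st.2.1 st.2.2
  else acc
termination_by t.length - i

def transform_to_normal_format_alt (tt_format_text : String) : String :=
  let compact := PySem.Chars.join []
    ((PySem.Chars.splitOn tt_format_text.toList ['\n']).map (fun line =>
      let s := PySem.Chars.strip line
      if s == [] then "\n\n".toList else s ++ [' ']))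
  let newText := pvB_loop compact 0 [] 0 0
  let fixed := (PySem.Chars.splitlines newText).map (fun line =>
    if PySem.Chars.endswith line [' '] then PySem.Chars.strip line else line)
  String.ofList (PySem.Chars.strip (PySem.Chars.join ['\n'] fixed))

-- ===== PRECONDITION & SPEC =====
def Spec_transform_to_normal_format (tt_format_text : String) (out : String) : Prop := out = transform_to_normal_format_alt tt_format_text
instance (tt_format_text : String) (out : String) : Decidable (Spec_transform_to_normal_format tt_format_text out) := by unfold Spec_transform_to_normal_format; infer_instance

-- ===== CLAIM (what is proved, stated in full; the proofs are below) =====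
def Claim_equal_transform_to_normal_format : Prop := ∀ (tt_format_text : String), Dom_transform_to_normal_format tt_format_text → Spec_transform_to_normal_format tt_format_text (transform_to_normal_format tt_format_text)

-- ===== LEMMAS AND PROOFS =====

-- A's skip/insert decision at position i, read off from the branch structure of pvA_step
def pvCondA (t : List Char) (i : Nat) : Bool :=
  !(pvGetD t i == '.' && pvGetD t (i+1) == '.')
  && !(pvGetD t i == '.' && (pvNums.contains (pvGetD t (i-1)) && pvNums.contains (pvGetD t (i+1))
        && pvNums.contains (pvGetD t (i+2)) && pvNums.contains (pvGetD t (i+3))))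
  && !(pvGetD t i == '.' &&
        ((pvGetD t (i+1) == 'n' && pvGetD t (i+2) == 'l')
         || (pvGetD t (i+1) == 'c' && pvGetD t (i+2) == 'o' && pvGetD t (i+3) == 'm')
         || (pvGetD t (i+1) == 'n' && pvGetD t (i+2) == 'e' && pvGetD t (i+3) == 't')
         || (pvGetD t (i+1) == 'o' && pvGetD t (i+2) == 'r' && pvGetD t (i+3) == 'g')
         || (pvGetD t (i+1) == 'e' && pvGetD t (i+2) == 'u')
         || (pvGetD t (i+1) == 'b' && pvGetD t (i+2) == 'e')))
  && !(pvGetD t i == ',' && (pvNums.contains (pvGetD t (i-1)) && pvNums.contains (pvGetD t (i+1))))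
  && !(".!?".toList.contains (pvGetD t i) && ("'\"".toList.contains (pvGetD t (i+1))
        && pvA_isClosingQuote (pvGetD t (i+1)) (i+1) t))
  && (".,!?;:".toList.contains (pvGetD t i) && (PySem.Chars.strip [pvGetD t (i+1)] != []))

def pvEmitA (t : List Char) (i : Nat) : List Char :=
  if i != 0 && pvCondA t i then [pvGetD t i, ' '] else [pvGetD t i]

def pvOutA (t : List Char) : Nat → List Char
  | 0 => []
  | i+1 => pvOutA t i ++ pvEmitA t i

def pvEmitB (t : List Char) (i : Nat) : List Char :=
  if i != 0 && pvB_shouldSpace t i ((t.take (i+1)).count '\'') ((t.take (i+1)).count '"')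
  then [pvGetD t i, ' '] else [pvGetD t i]

def pvOutB (t : List Char) : Nat → List Char
  | 0 => []
  | i+1 => pvOutB t i ++ pvEmitB t i

lemma pvGetD_eq (t : List Char) (k : Nat) : pvGetD t k = t.getD k ' ' := by
  simp [pvGetD, PySem.List.pyGet?_natCast, List.getD_eq_getElem?_getD]

lemma pvGetD_lt {t : List Char} {k : Nat} (h : k < t.length) : pvGetD t k = t[k] := by
  simp [pvGetD_eq, List.getD_eq_getElem?_getD, List.getElem?_eq_getElem h]

lemma pvEmitA_len (t : List Char) (i : Nat) : (pvEmitA t i).length = 1 + (if i != 0 && pvCondA t i then 1 else 0) := by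
  unfold pvEmitA; split <;> simp

lemma pvOutA_len (t : List Char) (i : Nat) : i ≤ (pvOutA t i).length := by
  induction i with
  | zero => simp [pvOutA]
  | succ i ih =>
    have := pvEmitA_len t i
    simp only [pvOutA, List.length_append]
    omega

lemma pv_count_go (c : Char) : ∀ (fuel : Nat) (l : List Char) (acc : Nat), l.length ≤ fuel →
    PySem.Chars.count.go [c] fuel l acc = acc + l.count c := by
  intro fuel
  induction fuel with
  | zero =>
    intro l acc h
    have : l = [] := List.eq_nil_of_length_eq_zero (by omega)
    subst this
    simp [PySem.Chars.count.go]
  | succ n ih =>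
    intro l acc h
    cases l with
    | nil => simp [PySem.Chars.count.go]
    | cons a tl =>
      rw [PySem.Chars.count.go]
      simp only [List.isPrefixOf, Bool.and_true]
      by_cases hca : c = a
      · subst hca
        simp only [beq_self_eq_true, if_pos]
        rw [ih _ _ (by simp at h ⊢; omega)]
        simp
        omega
      · rw [if_neg (by simp [hca])]
        rw [ih _ _ (by simp at h ⊢; omega)]
        simp [Ne.symm hca]

lemma pv_count_single (s : List Char) (c : Char) : PySem.Chars.count s [c] = s.count c := by
  simp only [PySem.Chars.count, List.isEmpty_cons, Bool.false_eq_true, if_false]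
  rw [pv_count_go c s.length s 0 le_rfl]
  simp

lemma pv_cnt_succ (t : List Char) (i : Nat) (q : Char) (h : i < t.length) :
    (t.take (i+1)).count q = (t.take i).count q + (if t[i] == q then 1 else 0) := by
  rw [List.take_add_one, List.getElem?_eq_getElem h]
  rw [List.count_append]
  simp only [Option.toList_some, List.count_cons, List.count_nil]
  split <;> simp_all

lemma pv_closing (t : List Char) (i : Nat) (hq : ("'\"".toList.contains (pvGetD t (i+1))) = true) :
    pvA_isClosingQuote (pvGetD t (i+1)) (i+1) t
      = ((if pvGetD t (i+1) == '\'' then (t.take (i+1)).count '\'' else (t.take (i+1)).count '"') % 2 == 1) := by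
  have hcase : pvGetD t (i+1) = '\'' ∨ pvGetD t (i+1) = '"' := by
    simpa using hq
  unfold pvA_isClosingQuote
  rw [PySem.List.slice_to_natCast, pv_count_single]
  rcases hcase with h | h <;> rw [h] <;> simp

lemma pv_pair_eq (t : List Char) (j : Nat) (x y : Char) (hx : x ≠ ' ') (hy : y ≠ ' ') :
    ((t.drop j).take 2 == [x, y]) = (pvGetD t j == x && pvGetD t (j+1) == y) := by
  have g0 : pvGetD t j = (t.drop j).getD 0 ' ' := by
    simp [pvGetD_eq, List.getD_eq_getElem?_getD, List.getElem?_drop]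
  have g1 : pvGetD t (j+1) = (t.drop j).getD 1 ' ' := by
    simp [pvGetD_eq, List.getD_eq_getElem?_getD, List.getElem?_drop]
  rw [g0, g1]
  generalize t.drop j = l
  rcases l with _ | ⟨a, _ | ⟨b, r⟩⟩ <;>
    simp [List.getD, Ne.symm hx, Ne.symm hy, Bool.and_comm]

lemma pv_triple_eq (t : List Char) (j : Nat) (x y z : Char) (hx : x ≠ ' ') (hy : y ≠ ' ') (hz : z ≠ ' ') :
    ((t.drop j).take 3 == [x, y, z]) = (pvGetD t j == x && pvGetD t (j+1) == y && pvGetD t (j+2) == z) := by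
  have g0 : pvGetD t j = (t.drop j).getD 0 ' ' := by
    simp [pvGetD_eq, List.getD_eq_getElem?_getD, List.getElem?_drop]
  have g1 : pvGetD t (j+1) = (t.drop j).getD 1 ' ' := by
    simp [pvGetD_eq, List.getD_eq_getElem?_getD, List.getElem?_drop]
  have g2 : pvGetD t (j+2) = (t.drop j).getD 2 ' ' := by
    simp [pvGetD_eq, List.getD_eq_getElem?_getD, List.getElem?_drop]
  rw [g0, g1, g2]
  generalize t.drop j = l
  rcases l with _ | ⟨a, _ | ⟨b, _ | ⟨c, r⟩⟩⟩ <;>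
    simp [List.getD, Ne.symm hx, Ne.symm hy, Ne.symm hz, Bool.and_comm, Bool.and_left_comm, Bool.and_assoc]

lemma pvCond_eq (t : List Char) (i : Nat) :
    pvCondA t i = pvB_shouldSpace t i ((t.take (i+1)).count '\'') ((t.take (i+1)).count '"') := by
  unfold pvB_shouldSpace
  simp only [PySem.List.slice_natCast, show i+3-(i+1) = 2 from by omega, show i+4-(i+1) = 3 from by omega]
  simp only [List.contains_cons, List.contains_nil, Bool.or_false]
  rw [show "nl".toList = ['n','l'] from rfl, show "eu".toList = ['e','u'] from rfl,
      show "be".toList = ['b','e'] from rfl, show "com".toList = ['c','o','m'] from rfl,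
      show "net".toList = ['n','e','t'] from rfl, show "org".toList = ['o','r','g'] from rfl]
  rw [pv_pair_eq t (i+1) 'n' 'l' (by decide) (by decide),
      pv_pair_eq t (i+1) 'e' 'u' (by decide) (by decide),
      pv_pair_eq t (i+1) 'b' 'e' (by decide) (by decide),
      pv_triple_eq t (i+1) 'c' 'o' 'm' (by decide) (by decide) (by decide),
      pv_triple_eq t (i+1) 'n' 'e' 't' (by decide) (by decide) (by decide),
      pv_triple_eq t (i+1) 'o' 'r' 'g' (by decide) (by decide) (by decide)]
  simp only [show i+1+1 = i+2 from by omega, show i+1+2 = i+3 from by omega]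
  unfold pvCondA
  by_cases hq : ("'\"".toList.contains (pvGetD t (i+1))) = true
  · rw [pv_closing t i hq, hq]
    simp only [bne]
    generalize (".,!?;:".toList.contains (pvGetD t i)) = p
    generalize (PySem.Chars.strip [pvGetD t (i+1)] == []) = w
    generalize (pvGetD t i == '.') = e
    generalize (pvGetD t (i+1) == '.') = z1
    generalize (pvNums.contains (pvGetD t (i-1))) = a1
    generalize (pvNums.contains (pvGetD t (i+1))) = a2
    generalize (pvNums.contains (pvGetD t (i+2))) = a3
    generalize (pvNums.contains (pvGetD t (i+3))) = a4
    generalize (pvGetD t (i+1) == 'n' && pvGetD t (i+2) == 'l') = k1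
    generalize (pvGetD t (i+1) == 'c' && pvGetD t (i+2) == 'o' && pvGetD t (i+3) == 'm') = k2
    generalize (pvGetD t (i+1) == 'n' && pvGetD t (i+2) == 'e' && pvGetD t (i+3) == 't') = k3
    generalize (pvGetD t (i+1) == 'o' && pvGetD t (i+2) == 'r' && pvGetD t (i+3) == 'g') = k4
    generalize (pvGetD t (i+1) == 'e' && pvGetD t (i+2) == 'u') = k5
    generalize (pvGetD t (i+1) == 'b' && pvGetD t (i+2) == 'e') = k6
    generalize (pvGetD t i == ',') = m
    generalize (".!?".toList.contains (pvGetD t i)) = f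
    generalize (((if pvGetD t (i+1) == '\'' then (t.take (i+1)).count '\'' else (t.take (i+1)).count '"') % 2 == 1)) = par
    cases p <;> cases w <;> cases e <;> cases m <;> cases f <;> cases par <;>
      simp [Bool.or_comm, Bool.or_left_comm, Bool.and_comm, Bool.and_left_comm, Bool.and_assoc]
  · rw [Bool.not_eq_true] at hq
    rw [hq]
    simp only [bne]
    generalize (".,!?;:".toList.contains (pvGetD t i)) = p
    generalize (PySem.Chars.strip [pvGetD t (i+1)] == []) = w
    generalize (pvGetD t i == '.') = e
    generalize (pvGetD t (i+1) == '.') = z1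
    generalize (pvNums.contains (pvGetD t (i-1))) = a1
    generalize (pvNums.contains (pvGetD t (i+1))) = a2
    generalize (pvNums.contains (pvGetD t (i+2))) = a3
    generalize (pvNums.contains (pvGetD t (i+3))) = a4
    generalize (pvGetD t (i+1) == 'n' && pvGetD t (i+2) == 'l') = k1
    generalize (pvGetD t (i+1) == 'c' && pvGetD t (i+2) == 'o' && pvGetD t (i+3) == 'm') = k2
    generalize (pvGetD t (i+1) == 'n' && pvGetD t (i+2) == 'e' && pvGetD t (i+3) == 't') = k3
    generalize (pvGetD t (i+1) == 'o' && pvGetD t (i+2) == 'r' && pvGetD t (i+3) == 'g') = k4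
    generalize (pvGetD t (i+1) == 'e' && pvGetD t (i+2) == 'u') = k5
    generalize (pvGetD t (i+1) == 'b' && pvGetD t (i+2) == 'e') = k6
    generalize (pvGetD t i == ',') = m
    cases p <;> cases w <;> cases e <;> cases m <;>
      simp [Bool.or_comm, Bool.or_left_comm, Bool.and_comm, Bool.and_left_comm, Bool.and_assoc]

lemma pvEmit_eq (t : List Char) (i : Nat) : pvEmitA t i = pvEmitB t i := by
  unfold pvEmitA pvEmitB
  rw [pvCond_eq]

lemma pvOut_eq (t : List Char) (i : Nat) : pvOutA t i = pvOutB t i := by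
  induction i with
  | zero => rfl
  | succ i ih => simp [pvOutA, pvOutB, ih, pvEmit_eq]

lemma pvA_step_eq (t : List Char) (i : Nat) (h : i < t.length) :
    pvA_step t i (pvOutA t i ++ t.drop i) ((pvOutA t i).length - i)
      = (pvOutA t (i+1) ++ t.drop (i+1), (pvOutA t (i+1)).length - (i+1)) := by
  have hlen := pvOutA_len t i
  have hdrop : t.drop i = pvGetD t i :: t.drop (i+1) := by
    rw [pvGetD_lt h]; exact List.drop_eq_getElem_cons h
  unfold pvA_step
  by_cases h0 : (i == 0) = true
  · rw [if_pos h0]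
    have hi0 : i = 0 := by simpa using h0
    subst hi0
    have he : pvEmitA t 0 = [pvGetD t 0] := by simp [pvEmitA]
    simp only [pvOutA, he, List.nil_append]
    rw [hdrop]
    refine Prod.ext ?_ ?_
    · simp
    · simp
  · rw [if_neg h0]
    by_cases h1 : (pvGetD t i == '.' && pvGetD t (i+1) == '.') = true
    · rw [if_pos h1]
      have hc : pvCondA t i = false := by unfold pvCondA; rw [h1]; simp
      have he : pvEmitA t i = [pvGetD t i] := by simp [pvEmitA, hc]
      simp only [pvOutA, he]
      rw [hdrop]
      refine Prod.ext ?_ ?_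
      · simp
      · simp only [List.length_append, List.length_cons, List.length_nil]
        omega
    · rw [if_neg h1]
      by_cases h2 : (pvGetD t i == '.' && (pvNums.contains (pvGetD t (i-1)) && pvNums.contains (pvGetD t (i+1)) && pvNums.contains (pvGetD t (i+2)) && pvNums.contains (pvGetD t (i+3)))) = true
      · rw [if_pos h2]
        have hc : pvCondA t i = false := by unfold pvCondA; rw [h2]; simp
        have he : pvEmitA t i = [pvGetD t i] := by simp [pvEmitA, hc]
        simp only [pvOutA, he]
        rw [hdrop]
        refine Prod.ext ?_ ?_
        · simp
        · simp only [List.length_append, List.length_cons, List.length_nil]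
          omega
      · rw [if_neg h2]
        by_cases h3 : (pvGetD t i == '.' && ((pvGetD t (i+1) == 'n' && pvGetD t (i+2) == 'l') || (pvGetD t (i+1) == 'c' && pvGetD t (i+2) == 'o' && pvGetD t (i+3) == 'm') || (pvGetD t (i+1) == 'n' && pvGetD t (i+2) == 'e' && pvGetD t (i+3) == 't') || (pvGetD t (i+1) == 'o' && pvGetD t (i+2) == 'r' && pvGetD t (i+3) == 'g') || (pvGetD t (i+1) == 'e' && pvGetD t (i+2) == 'u') || (pvGetD t (i+1) == 'b' && pvGetD t (i+2) == 'e'))) = true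
        · rw [if_pos h3]
          have hc : pvCondA t i = false := by unfold pvCondA; rw [h3]; simp
          have he : pvEmitA t i = [pvGetD t i] := by simp [pvEmitA, hc]
          simp only [pvOutA, he]
          rw [hdrop]
          refine Prod.ext ?_ ?_
          · simp
          · simp only [List.length_append, List.length_cons, List.length_nil]
            omega
        · rw [if_neg h3]
          by_cases h4 : (pvGetD t i == ',' && (pvNums.contains (pvGetD t (i-1)) && pvNums.contains (pvGetD t (i+1)))) = true
          · rw [if_pos h4]
            have hc : pvCondA t i = false := by unfold pvCondA; rw [h4]; simp
            have he : pvEmitA t i = [pvGetD t i] := by simp [pvEmitA, hc]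
            simp only [pvOutA, he]
            rw [hdrop]
            refine Prod.ext ?_ ?_
            · simp
            · simp only [List.length_append, List.length_cons, List.length_nil]
              omega
          · rw [if_neg h4]
            by_cases h5 : (".!?".toList.contains (pvGetD t i) && ("'\"".toList.contains (pvGetD t (i+1)) && pvA_isClosingQuote (pvGetD t (i+1)) (i+1) t)) = true
            · rw [if_pos h5]
              have hc : pvCondA t i = false := by unfold pvCondA; rw [h5]; simp
              have he : pvEmitA t i = [pvGetD t i] := by simp [pvEmitA, hc]
              simp only [pvOutA, he]
              rw [hdrop]
              refine Prod.ext ?_ ?_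
              · simp
              · simp only [List.length_append, List.length_cons, List.length_nil]
                omega
            · rw [if_neg h5]
              by_cases h6 : (".,!?;:".toList.contains (pvGetD t i) && (PySem.Chars.strip [pvGetD t (i+1)] != [])) = true
              · rw [if_pos h6]
                have hi0 : i ≠ 0 := by simpa using h0
                simp only [Bool.not_eq_true] at h1 h2 h3 h4 h5
                have hc : pvCondA t i = true := by
                  unfold pvCondA; rw [h1, h2, h3, h4, h5, h6]; simp
                have he : pvEmitA t i = [pvGetD t i, ' '] := by simp [pvEmitA, hc, hi0]
                have hidx : i + ((pvOutA t i).length - i + 1) = (pvOutA t i).length + 1 := by omega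
                dsimp only
                rw [hidx, PySem.List.slice_to_natCast, PySem.List.slice_from_natCast]
                rw [List.take_append]
                rw [List.take_of_length_le (by omega)]
                rw [hdrop]
                simp only [pvOutA, he, List.length_append]
                refine Prod.ext ?_ ?_
                · simp
                · simp only [List.length_cons, List.length_nil]
                  omega
              · rw [if_neg h6]
                have h6' := Bool.not_eq_true _ |>.mp h6
                have hc : pvCondA t i = false := by unfold pvCondA; rw [h6']; simp
                have he : pvEmitA t i = [pvGetD t i] := by simp [pvEmitA, hc]
                simp only [pvOutA, he]
                rw [hdrop]
                refine Prod.ext ?_ ?_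
                · simp
                · simp only [List.length_append, List.length_cons, List.length_nil]
                  omega

lemma pvA_loop_inv (t : List Char) (i : Nat) (hi : i ≤ t.length) :
    pvA_loop t i (pvOutA t i ++ t.drop i) ((pvOutA t i).length - i)
      = (pvOutA t t.length, (pvOutA t t.length).length - t.length) := by
  rw [pvA_loop]
  by_cases h : i < t.length
  · simp only [dif_pos h, pvA_step_eq t i h]
    exact pvA_loop_inv t (i+1) h
  · have : i = t.length := by omega
    subst this
    simp
termination_by t.length - i

lemma pvB_step_eq (t : List Char) (i : Nat) (h : i < t.length) :
    pvB_step t i (pvOutB t i) ((t.take i).count '\'') ((t.take i).count '"')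
      = (pvOutB t (i+1), (t.take (i+1)).count '\'', (t.take (i+1)).count '"') := by
  have hsq : (if pvGetD t i == '\'' then (t.take i).count '\'' + 1 else (t.take i).count '\'')
      = (t.take (i+1)).count '\'' := by
    rw [pv_cnt_succ t i '\'' h, pvGetD_lt h]
    by_cases hc : t[i] = '\'' <;> simp [hc]
  have hdq : (if pvGetD t i == '"' then (t.take i).count '"' + 1 else (t.take i).count '"')
      = (t.take (i+1)).count '"' := by
    rw [pv_cnt_succ t i '"' h, pvGetD_lt h]
    by_cases hc : t[i] = '"' <;> simp [hc]
  unfold pvB_step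
  simp only [hsq, hdq]
  simp only [pvOutB, pvEmitB]
  split <;> simp

lemma pvB_loop_inv (t : List Char) (i : Nat) (hi : i ≤ t.length) :
    pvB_loop t i (pvOutB t i) ((t.take i).count '\'') ((t.take i).count '"') = pvOutB t t.length := by
  rw [pvB_loop]
  by_cases h : i < t.length
  · simp only [dif_pos h, pvB_step_eq t i h]
    exact pvB_loop_inv t (i+1) h
  · have : i = t.length := by omega
    subst this
    simp
termination_by t.length - i

lemma pvFix_eq (line : List Char) :
    (if PySem.List.pyGet? line (-1) == some ' ' then PySem.Chars.strip line else line)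
      = (if PySem.Chars.endswith line [' '] then PySem.Chars.strip line else line) := by
  rcases List.eq_nil_or_concat line with rfl | ⟨xs, a, rfl⟩
  · decide
  · rw [List.concat_eq_append]
    have h1 : PySem.List.pyGet? (xs ++ [a]) (-1) = some a := by
      simp [PySem.List.pyGet?, PySem.List.pyIdx?]
    have h2 : PySem.Chars.endswith (xs ++ [a]) [' '] = (a == ' ') := by
      by_cases ha : a = ' '
      · subst ha
        rw [(PySem.Chars.endswith_iff _ _).mpr (List.suffix_append xs [' '])]
        simp
      · have hns : ¬ ([' '] <:+ xs ++ [a]) := by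
          intro hs
          rcases hs with ⟨u, hu⟩
          have : ' ' = a := by
            have := congrArg (fun l => l.getLast?) hu
            simpa using this
          exact ha this.symm
        rw [beq_eq_false_iff_ne.mpr ha]
        exact (Bool.eq_false_iff).mpr (fun hh => hns ((PySem.Chars.endswith_iff _ _).mp hh))
    rw [h1, h2]
    by_cases ha : a = ' ' <;> simp [ha]

-- ===== VERDICT (by name: the statement is the Claim_ definition above) =====
theorem transform_to_normal_format_spec : Claim_equal_transform_to_normal_format := by
  intro s _
  unfold Spec_transform_to_normal_format transform_to_normal_format transform_to_normal_format_alt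
  simp only []
  generalize (PySem.Chars.join []
    ((PySem.Chars.splitOn s.toList ['\n']).map (fun line =>
      if PySem.Chars.strip line == [] then "\n\n".toList else PySem.Chars.strip line ++ [' ']))) = C
  have hA : (pvA_loop C 0 C 0).1 = pvOutA C C.length := by
    have := pvA_loop_inv C 0 (Nat.zero_le _)
    simp only [pvOutA, List.nil_append, List.drop_zero, List.length_nil, Nat.zero_sub] at this
    rw [this]
  have hB : pvB_loop C 0 [] 0 0 = pvOutB C C.length := by
    have := pvB_loop_inv C 0 (Nat.zero_le _)
    simpa [pvOutB] using this
  rw [hA, hB, pvOut_eq]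
  simp only [pvFix_eq]
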